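-- pv_equiv track=rewrite | github.com/greghuang8/rosalind | utils/s_functions.py | q11
-- ===== SOURCE A (Python) =====
-- def q11(n:int, m:int):
--     rabbits_seq = [1,1]
--     months = 2
--     offset = m + 1
--     while months < n:
--         if months < m:
--             rabbits_seq.append(rabbits_seq[-2]+rabbits_seq[-1])
--         elif months == m:
--             rabbits_seq.append(rabbits_seq[-2]+rabbits_seq[-1]-1)
--         else:
--             rabbits_seq.append(rabbits_seq[-2]+rabbits_seq[-1]-rabbits_seq[-offset])
--         months += 1
--     return rabbits_seq[-1]
-- ===== SOURCE B (Python) =====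
-- def q11(n, m):
--     # Age-cohort simulation with a circular buffer: ages[p] holds the number of
--     # pairs born in the month mapped to slot p; only min(m, n) cohorts can ever
--     # be alive, so the buffer has that size.  O(n) time, O(min(n, m)) space.
--     if m < 1:
--         return 0
--     k = min(m, n) if n > 1 else 1
--     ages = [0] * k
--     ages[0] = 1
--     total = 1
--     i = 0
--     for _ in range(n - 1):
--         newborns = total - ages[i]
--         i = (i + 1) % k
--         total += newborns - ages[i]
--         ages[i] = newborns
--     return total
-- ===== Notes on version B (the rewrite author's own statement) =====
-- stated objective: alternative
-- what changed: B replaces A's ever-growing list of monthly totals driven by the F(t)=F(t-1)+F(t-2)-F(t-m-1) recurrence with a direct age-cohort simulation: a circular buffer of size min(n,m) holding pairs-by-birth-month, updated in O(1) per month with a running total, so memory drops from O(n) to O(min(n,m)).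
-- intended difference: On lifespans too short for the first pair to ever breed (m = 0 for any n, and m = 1 once n >= 2) A returns 1 forever as if the initial pair never died, while B returns 0, the intended mortal-rabbit population once that pair is dead. — e.g. on q11(3, 1): A returns 1, B returns 0
-- outside the precondition, e.g. on q11(5, -1): A returns 1, B returns 0; on q11(2, -7): A returns 1, B returns 0; on q11(5, -7): A raises IndexError, B returns 0
import Mathlib
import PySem

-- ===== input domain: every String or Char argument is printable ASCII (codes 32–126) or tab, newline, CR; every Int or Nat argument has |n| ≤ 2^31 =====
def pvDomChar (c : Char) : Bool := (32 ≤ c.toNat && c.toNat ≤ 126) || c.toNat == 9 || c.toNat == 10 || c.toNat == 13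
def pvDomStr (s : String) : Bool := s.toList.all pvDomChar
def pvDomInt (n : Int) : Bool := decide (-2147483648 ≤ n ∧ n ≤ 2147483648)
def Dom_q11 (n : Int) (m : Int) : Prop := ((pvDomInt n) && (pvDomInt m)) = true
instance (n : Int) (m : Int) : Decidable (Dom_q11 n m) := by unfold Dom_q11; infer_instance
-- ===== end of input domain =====

-- B replaces A's unbounded month-by-month recurrence list with a circular buffer of
-- age cohorts of size min(n, m) (alternative algorithm; not measured faster than A).

-- ===== PORT A =====
-- Python list indexing s[i] on an Array (Python lists are dynamic arrays; append = push):
-- negative i counts from the end; default where Python raises IndexError (excluded by Pre_).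
def pyArrGetD (a : Array Int) (i : Int) (d : Int) : Int :=
  let j : Int := if i < 0 then (a.size : Int) + i else i
  if 0 ≤ j ∧ j < (a.size : Int) then a.getD j.toNat d else d

def q11Loop (n : Int) (m : Int) (offset : Int) (s : Array Int) (months : Int) : Array Int :=
  if _h : months < n then
    let last2 := pyArrGetD s (-2) 0
    let last  := pyArrGetD s (-1) 0
    let v : Int :=
      if months < m then last2 + last
      else if months = m then last2 + last - 1
      else last2 + last - pyArrGetD s (-offset) 0
    q11Loop n m offset (s.push v) (months + 1)
  else s
termination_by (n - months).toNat
decreasing_by omega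

def q11 (n : Int) (m : Int) : Int :=
  pyArrGetD (q11Loop n m (m + 1) #[1, 1] 2) (-1) 0

-- ===== PORT B =====
def q11AltLoop (k : Nat) (ages : Array Int) (total : Int) (i : Nat) : Nat → Int
  | 0 => total
  | steps + 1 =>
    let newborns := total - ages.getD i 0
    let i' := (i + 1) % k
    let total' := total + (newborns - ages.getD i' 0)
    q11AltLoop k (ages.setIfInBounds i' newborns) total' i' steps

def q11_alt (n : Int) (m : Int) : Int :=
  if m < 1 then 0
  else
    let k : Int := if 1 < n then min m n else 1
    q11AltLoop k.toNat ((Array.replicate k.toNat (0 : Int)).setIfInBounds 0 1) 1 0 (n - 1).toNat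

-- ===== PRECONDITION & SPEC =====
-- Pre_ excludes negative lifespans m < 0, which lie outside the problem's natural
-- domain: A raises IndexError there for every m ≤ -3 with n ≥ 3, and where it still
-- returns (m = -1, m = -2, or n ≤ 2) the value comes from negative-index wraparound;
-- B's age-cohort buffer is meaningless for a negative lifespan and returns 0 there.
def Pre_q11 (n : Int) (m : Int) : Prop := 0 ≤ m
instance (n : Int) (m : Int) : Decidable (Pre_q11 n m) := by unfold Pre_q11; infer_instance
def pvWitness_q11 : Int × Int := (12, 4)

-- On lifespans too short for the first pair to ever breed (m = 0, or m = 1 from month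
-- 2 on) A returns 1 forever, as if the initial pair never died; B returns 0, the
-- intended mortal-rabbit population once that pair is dead.
def D_q11 (n : Int) (m : Int) : Prop := m = 0 ∨ (m = 1 ∧ 2 ≤ n)
instance (n : Int) (m : Int) : Decidable (D_q11 n m) := by unfold D_q11; infer_instance

def Spec_q11 (n : Int) (m : Int) (out : Int) : Prop := ¬ D_q11 n m → out = q11_alt n m
instance (n : Int) (m : Int) (out : Int) : Decidable (Spec_q11 n m out) := by unfold Spec_q11; infer_instance

def pvDiffWitness_q11 : Int × Int := (3, 1)
def pvDiffWitnessOut_q11 : Int × Int := (1, 0)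

-- ===== CLAIM (what is proved, stated in full; the proofs are below) =====
def Claim_unchanged_q11 : Prop := ∀ (n : Int) (m : Int), Dom_q11 n m → Pre_q11 n m → Spec_q11 n m (q11 n m)
def Claim_changed_q11 : Prop := Dom_q11 (pvDiffWitness_q11.1) (pvDiffWitness_q11.2) ∧ Pre_q11 (pvDiffWitness_q11.1) (pvDiffWitness_q11.2) ∧ D_q11 (pvDiffWitness_q11.1) (pvDiffWitness_q11.2) ∧ q11 (pvDiffWitness_q11.1) (pvDiffWitness_q11.2) = pvDiffWitnessOut_q11.1 ∧ q11_alt (pvDiffWitness_q11.1) (pvDiffWitness_q11.2) = pvDiffWitnessOut_q11.2 ∧ pvDiffWitnessOut_q11.1 ≠ pvDiffWitnessOut_q11.2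
def Claim_exact_q11 : Prop := ∀ (n : Int) (m : Int), Dom_q11 n m → Pre_q11 n m → D_q11 n m → q11 n m ≠ q11_alt n m

-- ===== LEMMAS AND PROOFS =====

-- List-level models of the two ports (proof helpers; the kernel proofs run on these,
-- and bridge lemmas below identify them with the Array ports).
def q11LoopL (n : Int) (m : Int) (offset : Int) (s : List Int) (months : Int) : List Int :=
  if _h : months < n then
    let last2 := PySem.List.pyGetD s (-2) 0
    let last  := PySem.List.pyGetD s (-1) 0
    let v : Int :=
      if months < m then last2 + last
      else if months = m then last2 + last - 1
      else last2 + last - PySem.List.pyGetD s (-offset) 0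
    q11LoopL n m offset (s ++ [v]) (months + 1)
  else s
termination_by (n - months).toNat
decreasing_by omega

def q11L (n : Int) (m : Int) : Int :=
  PySem.List.pyGetD (q11LoopL n m (m + 1) [1, 1] 2) (-1) 0

def q11AltLoopL (k : Nat) (ages : List Int) (total : Int) (i : Nat) : Nat → Int
  | 0 => total
  | steps + 1 =>
    let newborns := total - ages.getD i 0
    let i' := (i + 1) % k
    let total' := total + (newborns - ages.getD i' 0)
    q11AltLoopL k (ages.set i' newborns) total' i' steps

def q11_altL (n : Int) (m : Int) : Int :=
  if m < 1 then 0
  else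
    let k : Int := if 1 < n then min m n else 1
    q11AltLoopL k.toNat ((List.replicate k.toNat (0 : Int)).set 0 1) 1 0 (n - 1).toNat


def nbseq (m : Nat) (t : Nat) : Int :=
  match t with
  | 0 => 0
  | 1 => 1
  | (u + 2) => (∑ a ∈ Finset.range m, nbseq m (u + 1 - a)) - nbseq m (u + 1)
termination_by t
decreasing_by all_goals omega

def tpop (m : Nat) (t : Nat) : Int := ∑ a ∈ Finset.range m, nbseq m (t - a)

lemma nbseq_succ_succ (m u : Nat) : nbseq m (u + 2) = tpop m (u + 1) - nbseq m (u + 1) := by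
  rw [nbseq, tpop]

lemma tpop_one (m : Nat) (hm : 1 ≤ m) : tpop m 1 = 1 := by
  obtain ⟨M, rfl⟩ := Nat.exists_eq_add_of_le hm
  unfold tpop
  rw [Nat.add_comm, Finset.sum_range_succ']
  have h1 : ∀ i ∈ Finset.range M, nbseq (M + 1) (1 - (i + 1)) = 0 := by
    intro i _; simp [nbseq]
  rw [Finset.sum_congr rfl h1]
  simp [nbseq]

lemma tpop_succ (m t : Nat) (hm : 1 ≤ m) :
    tpop m (t + 1) = tpop m t + nbseq m (t + 1) - nbseq m (t + 1 - m) := by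
  obtain ⟨M, rfl⟩ := Nat.exists_eq_add_of_le hm
  unfold tpop
  rw [Nat.add_comm 1 M, Finset.sum_range_succ', Finset.sum_range_succ]
  have h1 : ∀ i ∈ Finset.range M, nbseq (M + 1) (t + 1 - (i + 1)) = nbseq (M + 1) (t - i) := by
    intro i _; congr 1; omega
  rw [Finset.sum_congr rfl h1]
  have h2 : t + 1 - (M + 1) = t - M := by omega
  rw [h2]
  abel

def fseq (m : Nat) (t : Nat) : Int :=
  match t with
  | 0 => 0
  | 1 => 1
  | 2 => 1
  | (u + 3) =>
    fseq m (u + 2) + fseq m (u + 1) -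
      (if u + 2 < m then 0 else if u + 2 = m then 1 else fseq m (u + 2 - m))
termination_by t
decreasing_by all_goals omega

lemma tpop_eq_fseq (m : Nat) (hm : 2 ≤ m) : ∀ t, 1 ≤ t → tpop m t = fseq m t := by
  intro t
  induction t using Nat.strong_induction_on with
  | _ t ih =>
    intro _
    match t with
    | 1 => rw [tpop_one m (by omega)]; simp [fseq]
    | 2 =>
      have h := tpop_succ m 1 (by omega)
      have h2 : (2 : Nat) - m = 0 := by omega
      rw [show (1:Nat)+1 = 2 from rfl, h2] at h
      rw [h, nbseq_succ_succ m 0, tpop_one m (by omega)]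
      simp [nbseq, fseq]
    | (u + 3) =>
      have h1 := tpop_succ m (u + 2) (by omega)
      have h2 := nbseq_succ_succ m (u + 1)
      have h3 := nbseq_succ_succ m u
      have h4 : tpop m (u + 2) = fseq m (u + 2) := ih (u + 2) (by omega) (by omega)
      have h5 : tpop m (u + 1) = fseq m (u + 1) := ih (u + 1) (by omega) (by omega)
      have h6 := tpop_succ m (u + 1) (by omega)
      rw [fseq]
      rcases lt_trichotomy (u + 2) m with hc | hc | hc
      · have e1 : u + 2 + 1 - m = 0 := by omega
        have e2 : u + 2 - m = 0 := by omega
        have e3 : u + 1 + 1 - m = 0 := by omega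
        rw [e1] at h1
        rw [e3] at h6
        rw [if_pos hc]
        have hnb0 : nbseq m 0 = 0 := by simp [nbseq]
        linarith
      · have e1 : u + 2 + 1 - m = 1 := by omega
        have e3 : u + 1 + 1 - m = 0 := by omega
        rw [e1] at h1
        rw [e3] at h6
        rw [if_neg (by omega), if_pos hc]
        have hnb0 : nbseq m 0 = 0 := by simp [nbseq]
        have hnb1 : nbseq m 1 = 1 := by simp [nbseq]
        linarith
      · obtain ⟨K, hK⟩ : ∃ K, u + 2 - m = K + 1 := ⟨u + 1 - m, by omega⟩
        have e1 : u + 2 + 1 - m = K + 2 := by omega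
        have e3 : u + 1 + 1 - m = K + 1 := by omega
        rw [e1] at h1
        rw [e3] at h6
        rw [if_neg (by omega), if_neg (by omega), hK]
        have h7 := nbseq_succ_succ m K
        have h8 : tpop m (K + 1) = fseq m (K + 1) := ih (K + 1) (by omega) (by omega)
        linarith

lemma fseq_congr (k m : Nat) : ∀ t, t ≤ k → t ≤ m → fseq k t = fseq m t := by
  intro t
  induction t using Nat.strong_induction_on with
  | _ t ih =>
    intro hk hm
    match t with
    | 0 => simp [fseq]
    | 1 => simp [fseq]
    | 2 => simp [fseq]
    | (u + 3) =>
      rw [fseq, fseq, if_pos (by omega), if_pos (by omega),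
        ih (u + 2) (by omega) (by omega) (by omega),
        ih (u + 1) (by omega) (by omega) (by omega)]

lemma pv_mod_ne (j a k : Nat) (h1 : 1 ≤ a) (h2 : a < k) : (j + k - a) % k ≠ j % k := by
  intro h
  have h' : Nat.ModEq k (j + k - a) j := h
  have h'' := h'.add_right a
  have e : j + k - a + a = j + k := by omega
  rw [e] at h''
  have hjk : Nat.ModEq k (j + k) j := by
    unfold Nat.ModEq; rw [Nat.add_mod_right]
  have hja : Nat.ModEq k (j + a) (j + 0) := by simpa using (h''.symm.trans hjk)
  have hcancel : Nat.ModEq k a 0 := Nat.ModEq.add_left_cancel (Nat.ModEq.refl j) hja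
  have ha0 : a % k = 0 := by simpa [Nat.ModEq] using hcancel
  rw [Nat.mod_eq_of_lt h2] at ha0
  omega

lemma altLoop_inv (k : Nat) (hk : 2 ≤ k) :
    ∀ (steps j : Nat) (ages : List Int) (total : Int),
      ages.length = k →
      (∀ a, a < k → ages.getD ((j + k - a) % k) 0 = nbseq k (j + 1 - a)) →
      total = tpop k (j + 1) →
      q11AltLoopL k ages total (j % k) steps = tpop k (j + 1 + steps) := by
  intro steps
  induction steps with
  | zero => intro j ages total _ _ ht; simpa using ht
  | succ s ih =>
    intro j ages total hlen hinv ht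
    rw [q11AltLoopL]
    have hkpos : 0 < k := by omega
    -- ages[j % k] is the cohort born this month (a = 0)
    have hi0 : ages.getD (j % k) 0 = nbseq k (j + 1) := by
      have := hinv 0 hkpos
      simpa [Nat.add_mod_right] using this
    -- next index
    have hi' : (j % k + 1) % k = (j + 1) % k := by
      rw [Nat.mod_add_mod]
    -- ages[(j+1) % k] is the oldest cohort (a = k-1)
    have hold : ages.getD ((j + 1) % k) 0 = nbseq k (j + 2 - k) := by
      have h := hinv (k - 1) (by omega)
      have e1 : j + k - (k - 1) = j + 1 := by omega
      have e2 : j + 1 - (k - 1) = j + 2 - k := by omega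
      rw [e1, e2] at h
      exact h
    -- newborns this step = nbseq k (j+2)
    have hnew : total - ages.getD (j % k) 0 = nbseq k (j + 2) := by
      rw [hi0, ht, nbseq_succ_succ]
    -- new total = tpop k (j+2)
    have htot : total + ((total - ages.getD (j % k) 0) - ages.getD ((j % k + 1) % k) 0)
        = tpop k (j + 2) := by
      rw [hnew, hi', hold, ht, tpop_succ k (j + 1) (by omega)]
      have e : j + 1 + 1 - k = j + 2 - k := by omega
      rw [e]; ring
    rw [hi']
    have happ := ih (j + 1) (ages.set ((j + 1) % k) (total - ages.getD (j % k) 0))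
        (total + ((total - ages.getD (j % k) 0) - ages.getD ((j % k + 1) % k) 0))
        (by simpa using hlen)
        ?_ (by rw [htot])
    · rw [hi'] at happ
      have e : j + 1 + 1 + s = j + 1 + (s + 1) := by omega
      rw [← e]
      exact happ
    · intro a ha
      by_cases ha0 : a = 0
      · subst ha0
        have hidx : (j + 1 + k - 0) % k = (j + 1) % k := by
          simp [Nat.add_mod_right]
        rw [hidx]
        have hset : ((ages.set ((j + 1) % k) (total - ages.getD (j % k) 0)).getD ((j + 1) % k) 0)
            = total - ages.getD (j % k) 0 := by
          simp [List.getD_eq_getElem?_getD, List.getElem?_set_self, Nat.mod_lt, hlen, hkpos]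
        rw [hset, hnew]
        norm_num
      · have ha1 : 1 ≤ a := by omega
        have hne : (j + 1 + k - a) % k ≠ (j + 1) % k := pv_mod_ne (j + 1) a k ha1 ha
        have hset : ((ages.set ((j + 1) % k) (total - ages.getD (j % k) 0)).getD ((j + 1 + k - a) % k) 0)
            = ages.getD ((j + 1 + k - a) % k) 0 := by
          simp [List.getD_eq_getElem?_getD, List.getElem?_set_ne (Ne.symm hne)]
        rw [hset]
        have e1 : j + 1 + k - a = j + k - (a - 1) := by omega
        have e2 : j + 1 + 1 - a = j + 1 - (a - 1) := by omega
        rw [e1, e2]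
        exact hinv (a - 1) (by omega)

lemma q11_altL_eq_fseq (n m : Int) (hm : 2 ≤ m) (hn : 2 ≤ n) :
    q11_altL n m = fseq m.toNat n.toNat := by
  rw [q11_altL, if_neg (by omega), if_pos (by omega)]
  set K := (min m n).toNat with hK
  have hK2 : 2 ≤ K := by omega
  have hlen : ((List.replicate K (0 : Int)).set 0 1).length = K := by simp
  have hinv : ∀ a, a < K →
      ((List.replicate K (0 : Int)).set 0 1).getD ((0 + K - a) % K) 0 = nbseq K (0 + 1 - a) := by
    intro a ha
    by_cases ha0 : a = 0
    · subst ha0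
      have e : (0 + K - 0) % K = 0 := by simp [Nat.mod_self]
      rw [e]
      have : ((List.replicate K (0 : Int)).set 0 1).getD 0 0 = 1 := by
        simp [List.getD_eq_getElem?_getD, List.getElem?_set_self, hlen, hK2,
          show 0 < K by omega]
      rw [this]; simp [nbseq]
    · have h1 : 1 ≤ a := by omega
      have e : (0 + K - a) % K = K - a := by
        rw [show 0 + K - a = K - a by omega, Nat.mod_eq_of_lt (by omega)]
      rw [e]
      have hne : (0 : Nat) ≠ K - a := by omega
      have : ((List.replicate K (0 : Int)).set 0 1).getD (K - a) 0 = 0 := by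
        simp [List.getD_eq_getElem?_getD, List.getElem?_set_ne hne, List.getElem?_replicate]
        split <;> rfl
      rw [this]
      have e2 : 0 + 1 - a = 0 := by omega
      rw [e2]; simp [nbseq]
  have hres := altLoop_inv K hK2 (n - 1).toNat 0 ((List.replicate K (0 : Int)).set 0 1) 1
      hlen hinv (by rw [tpop_one K (by omega)])
  simp only [Nat.zero_mod] at hres
  show q11AltLoopL K ((List.replicate K (0 : Int)).set 0 1) 1 0 (n - 1).toNat = fseq m.toNat n.toNat
  rw [hres]
  have e3 : 0 + 1 + (n - 1).toNat = n.toNat := by omega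
  rw [e3, tpop_eq_fseq K hK2 n.toNat (by omega)]
  rcases le_or_gt m n with hmn | hmn
  · have : K = m.toNat := by omega
    rw [this]
  · have hKn : K = n.toNat := by omega
    rw [hKn]
    exact fseq_congr n.toNat m.toNat n.toNat (by omega) (by omega)

lemma aLoop_inv (m : Int) (M : Nat) (hM : m = (M : Int)) :
    ∀ (d : Nat) (t : Nat) (n : Int), 2 ≤ t → n ≤ (t : Int) + (d : Int) →
      q11LoopL n m (m + 1) ((List.range' 1 t).map (fseq M)) (t : Int) =
        (List.range' 1 (max n.toNat t)).map (fseq M) := by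
  subst hM
  intro d
  induction d with
  | zero =>
    intro t n ht hn
    rw [q11LoopL, dif_neg (by omega)]
    have e : max n.toNat t = t := by omega
    rw [e]
  | succ d ih =>
    intro t n ht hn
    by_cases h : (t : Int) < n
    · rw [q11LoopL, dif_pos h]
      have hslen : ((List.range' 1 t).map (fseq M)).length = t := by simp
      have hg1 : PySem.List.pyGetD ((List.range' 1 t).map (fseq M)) (-1) 0 = fseq M t := by
        rw [PySem.List.pyGetD_neg_ofNat _ 1 0 (by omega) (by omega)]
        simp only [List.length_map, List.length_range', List.getElem_map, List.getElem_range']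
        congr 1; omega
      have hg2 : PySem.List.pyGetD ((List.range' 1 t).map (fseq M)) (-2) 0 = fseq M (t - 1) := by
        rw [PySem.List.pyGetD_neg_ofNat _ 2 0 (by omega) (by omega)]
        simp only [List.length_map, List.length_range', List.getElem_map, List.getElem_range']
        congr 1; omega
      have hbranch :
          (if (t : Int) < (M : Int) then fseq M (t - 1) + fseq M t
           else if (t : Int) = (M : Int) then fseq M (t - 1) + fseq M t - 1
           else fseq M (t - 1) + fseq M t - PySem.List.pyGetD ((List.range' 1 t).map (fseq M)) (-((M : Int) + 1)) 0)
          = fseq M (t + 1) := by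
        obtain ⟨u, rfl⟩ : ∃ u, t = u + 2 := ⟨t - 2, by omega⟩
        have e1 : u + 2 - 1 = u + 1 := by omega
        rw [e1]
        rw [show (u + 2 : Nat) + 1 = u + 3 from rfl, fseq]
        rcases lt_trichotomy (u + 2) M with hc | hc | hc
        · rw [if_pos (by omega), if_pos (by omega)]
          ring
        · rw [if_neg (by omega), if_pos (by omega), if_neg (by omega), if_pos (by omega)]
          ring
        · rw [if_neg (by omega), if_neg (by omega), if_neg (by omega), if_neg (by omega)]
          have hcast : -((M : Int) + 1) = -(((M + 1 : Nat) : Int)) := by push_cast; ring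
          rw [hcast, PySem.List.pyGetD_neg_natCast _ (M + 1) 0 (by omega) (by omega)]
          simp only [List.length_map, List.length_range', List.getElem_map, List.getElem_range']
          have e2 : 1 + 1 * (u + 2 - (M + 1)) = u + 2 - M := by omega
          rw [e2]
          ring
      simp only [hg1, hg2]
      rw [hbranch]
      have happend : (List.range' 1 t).map (fseq M) ++ [fseq M (t + 1)] = (List.range' 1 (t + 1)).map (fseq M) := by
        rw [List.range'_concat]
        simp [Nat.add_comm]
      rw [happend]
      have hcast2 : (t : Int) + 1 = ((t + 1 : Nat) : Int) := by push_cast; ring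
      rw [hcast2]
      have hrec := ih (t + 1) n (by omega) (by push_cast; push_cast at hn; omega)
      rw [hrec]
      have e3 : max n.toNat (t + 1) = max n.toNat t := by omega
      rw [e3]
    · rw [q11LoopL, dif_neg h]
      have e : max n.toNat t = t := by omega
      rw [e]

lemma q11L_eq_fseq (n m : Int) (hm : 0 ≤ m) (hn : 2 ≤ n) :
    q11L n m = fseq m.toNat n.toNat := by
  rw [q11L]
  have hM : m = ((m.toNat : Nat) : Int) := by omega
  have hinit : ([1, 1] : List Int) = (List.range' 1 2).map (fseq m.toNat) := by
    norm_num [List.range', fseq]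
  rw [hinit]
  have h2 : ((2 : Nat) : Int) = (2 : Int) := by norm_num
  rw [← h2]
  rw [aLoop_inv m m.toNat hM (n - 2).toNat 2 n (by omega) (by omega)]
  have hmax : max n.toNat 2 = n.toNat := by omega
  rw [hmax]
  rw [PySem.List.pyGetD_neg_ofNat _ 1 0 (by omega) (by simp; omega)]
  simp only [List.length_map, List.length_range', List.getElem_map, List.getElem_range']
  congr 1; omega

lemma q11L_small (n m : Int) (hn : n ≤ 2) : q11L n m = 1 := by
  rw [q11L, q11LoopL, dif_neg (by omega)]
  decide

lemma repLoop_inv (m : Int) (hm : m = 0 ∨ m = 1) :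
    ∀ (d : Nat) (t : Nat) (n : Int), 2 ≤ t → n ≤ (t : Int) + (d : Int) →
      q11LoopL n m (m + 1) (List.replicate t 1) (t : Int) = List.replicate (max n.toNat t) 1 := by
  intro d
  induction d with
  | zero =>
    intro t n ht hn
    rw [q11LoopL, dif_neg (by omega)]
    have e : max n.toNat t = t := by omega
    rw [e]
  | succ d ih =>
    intro t n ht hn
    by_cases h : (t : Int) < n
    · rw [q11LoopL, dif_pos h]
      have hg1 : PySem.List.pyGetD (List.replicate t (1 : Int)) (-1) 0 = 1 := by
        rw [PySem.List.pyGetD_neg_ofNat _ 1 0 (by omega) (by simp; omega)]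
        simp
      have hg2 : PySem.List.pyGetD (List.replicate t (1 : Int)) (-2) 0 = 1 := by
        rw [PySem.List.pyGetD_neg_ofNat _ 2 0 (by omega) (by simp; omega)]
        simp
      have hgo : PySem.List.pyGetD (List.replicate t (1 : Int)) (-(m + 1)) 0 = 1 := by
        rcases hm with h0 | h1
        · subst h0; norm_num; exact hg1
        · subst h1; norm_num; exact hg2
      simp only [hg1, hg2, hgo]
      rw [if_neg (by rcases hm with h0 | h0 <;> omega),
        if_neg (by rcases hm with h0 | h0 <;> omega)]
      norm_num
      have happ : List.replicate t (1 : Int) ++ [1] = List.replicate (t + 1) 1 := by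
        rw [← List.replicate_succ']
      rw [happ]
      have hcast2 : (t : Int) + 1 = ((t + 1 : Nat) : Int) := by push_cast; ring
      rw [hcast2, ih (t + 1) n (by omega) (by push_cast; push_cast at hn; omega)]
      have e3 : max n.toNat (t + 1) = max n.toNat t := by omega
      rw [e3]
    · rw [q11LoopL, dif_neg h]
      have e : max n.toNat t = t := by omega
      rw [e]

lemma q11L_deg (n m : Int) (hm : m = 0 ∨ m = 1) : q11L n m = 1 := by
  rcases le_or_gt n 2 with hn | hn
  · exact q11L_small n m hn
  · rw [q11L]
    have hinit : ([1, 1] : List Int) = List.replicate 2 1 := rfl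
    have h2 : ((2 : Nat) : Int) = (2 : Int) := by norm_num
    rw [hinit, ← h2, repLoop_inv m hm (n - 2).toNat 2 n (by omega) (by omega)]
    rw [PySem.List.pyGetD_neg_ofNat _ 1 0 (by omega) (by simp)]
    simp

lemma altone : ∀ steps, q11AltLoopL 1 [0] 0 0 steps = 0 := by
  intro steps
  induction steps with
  | zero => rfl
  | succ s ih => rw [q11AltLoopL]; simpa using ih

lemma q11_altL_deg (n m : Int) (h : (m = 0) ∨ (m = 1 ∧ 2 ≤ n)) : q11_altL n m = 0 := by
  rcases h with h0 | ⟨h1, hn⟩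
  · rw [q11_altL, if_pos (by omega)]
  · subst h1
    rw [q11_altL, if_neg (by omega)]
    have hk : (if 1 < n then min 1 n else 1) = (1 : Int) := by
      rw [if_pos (by omega)]; omega
    rw [hk]
    obtain ⟨s, hs⟩ : ∃ s, (n - 1).toNat = s + 1 := ⟨(n - 2).toNat, by omega⟩
    rw [hs]
    show q11AltLoopL 1 [1] 1 0 (s + 1) = 0
    rw [q11AltLoopL]
    simpa using altone s

lemma q11_altL_small (n m : Int) (hm : 1 ≤ m) (hn : n ≤ 1) : q11_altL n m = 1 := by
  rw [q11_altL, if_neg (by omega)]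
  have hk : (if 1 < n then min m n else 1) = (1 : Int) := by rw [if_neg (by omega)]
  rw [hk]
  have hsteps : (n - 1).toNat = 0 := by omega
  rw [hsteps]
  rfl

-- ---- bridges: the Array ports compute the list models ----

lemma arr_getD_toArray (l : List Int) (i : Nat) (d : Int) : l.toArray.getD i d = l.getD i d := by
  have hsz : l.toArray.size = l.length := by simp
  simp only [Array.getD, List.getD_eq_getElem?_getD, hsz]
  split_ifs with h
  · rw [List.getElem?_eq_getElem h]
    simp
  · rw [List.getElem?_eq_none_iff.mpr (by omega)]
    rfl

lemma pyArrGetD_eq (l : List Int) (i : Int) (d : Int) :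
    pyArrGetD l.toArray i d = PySem.List.pyGetD l i d := by
  have hsz : l.toArray.size = l.length := by simp
  simp only [pyArrGetD, PySem.List.pyGetD, PySem.List.pyGet?, PySem.List.pyIdx?, hsz,
    arr_getD_toArray, List.getD_eq_getElem?_getD]
  by_cases hneg : i < 0
  · rw [if_pos hneg]
    by_cases hin : -(l.length : Int) ≤ i
    · rw [if_pos (by constructor <;> omega), if_neg (by omega), if_pos hin]
      simp only [Option.bind_some]
      have e : ((l.length : Int) + i).toNat = l.length - (-i).toNat := by omega
      rw [e]
    · rw [if_neg (by omega), if_neg (by omega), if_neg hin]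
      rfl
  · rw [if_neg hneg]
    by_cases hlt : i < (l.length : Int)
    · rw [if_pos (by constructor <;> omega), if_pos (by omega), if_pos hlt]
      simp only [Option.bind_some]
    · rw [if_neg (by omega), if_pos (by omega), if_neg hlt]
      rfl

lemma q11Loop_bridge (n m offset : Int) :
    ∀ (fuel : Nat) (t : Int) (l : List Int), (n - t).toNat ≤ fuel →
      q11Loop n m offset l.toArray t = (q11LoopL n m offset l t).toArray := by
  intro fuel
  induction fuel with
  | zero =>
    intro t l hf
    rw [q11Loop, dif_neg (by omega), q11LoopL, dif_neg (by omega)]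
  | succ f ih =>
    intro t l hf
    by_cases h : t < n
    · rw [q11Loop, dif_pos h, q11LoopL, dif_pos h]
      simp only [pyArrGetD_eq, List.push_toArray]
      exact ih (t + 1) _ (by omega)
    · rw [q11Loop, dif_neg h, q11LoopL, dif_neg h]

lemma q11_bridge (n m : Int) : q11 n m = q11L n m := by
  rw [q11, q11L]
  have h2 : (#[1, 1] : Array Int) = ([1, 1] : List Int).toArray := rfl
  rw [h2, q11Loop_bridge n m (m + 1) (n - 2).toNat 2 [1, 1] (by omega), pyArrGetD_eq]

lemma q11AltLoop_bridge (k : Nat) :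
    ∀ (steps : Nat) (l : List Int) (total : Int) (i : Nat),
      q11AltLoop k l.toArray total i steps = q11AltLoopL k l total i steps := by
  intro steps
  induction steps with
  | zero => intro l total i; rfl
  | succ s ih =>
    intro l total i
    rw [q11AltLoop, q11AltLoopL]
    simp only [arr_getD_toArray, List.setIfInBounds_toArray]
    exact ih _ _ _

lemma q11_alt_bridge (n m : Int) : q11_alt n m = q11_altL n m := by
  rw [q11_alt, q11_altL]
  by_cases h : m < 1
  · rw [if_pos h, if_pos h]
  · rw [if_neg h, if_neg h]
    show q11AltLoop (if 1 < n then min m n else 1).toNat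
        ((Array.replicate (if 1 < n then min m n else 1).toNat (0 : Int)).setIfInBounds 0 1) 1 0
        (n - 1).toNat
      = q11AltLoopL (if 1 < n then min m n else 1).toNat
        ((List.replicate (if 1 < n then min m n else 1).toNat (0 : Int)).set 0 1) 1 0 (n - 1).toNat
    rw [show (Array.replicate (if 1 < n then min m n else 1).toNat (0 : Int)).setIfInBounds 0 1
        = ((List.replicate (if 1 < n then min m n else 1).toNat (0 : Int)).set 0 1).toArray by
      rw [← List.toArray_replicate, List.setIfInBounds_toArray]]
    rw [q11AltLoop_bridge]

-- ===== VERDICT (by name: the statement is the Claim_ definition above) =====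
theorem q11_spec : Claim_unchanged_q11 := by
  intro n m _ hpre hnd
  have hm : (0 : Int) ≤ m := hpre
  rcases lt_trichotomy m 1 with h | h | h
  · exact absurd (Or.inl (by omega)) hnd
  · have hn : n ≤ 1 := by
      by_contra hc
      exact hnd (Or.inr ⟨h, by omega⟩)
    rw [q11_bridge, q11_alt_bridge, q11L_small n m (by omega), q11_altL_small n m (by omega) hn]
  · rcases le_or_gt n 1 with hn | hn
    · rw [q11_bridge, q11_alt_bridge, q11L_small n m (by omega), q11_altL_small n m (by omega) hn]
    · rw [q11_bridge, q11_alt_bridge, q11L_eq_fseq n m (by omega) (by omega), q11_altL_eq_fseq n m (by omega) (by omega)]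

theorem q11_changed : Claim_changed_q11 := by
  unfold Claim_changed_q11
  refine ⟨by decide, by decide, by decide, ?_, ?_, by decide⟩
  · rw [q11_bridge]; exact q11L_deg 3 1 (Or.inr rfl)
  · rw [q11_alt_bridge]; exact q11_altL_deg 3 1 (Or.inr ⟨rfl, by norm_num⟩)

theorem q11_tight : Claim_exact_q11 := by
  intro n m _ _ hD
  rw [q11_bridge, q11_alt_bridge, q11_altL_deg n m hD, q11L_deg n m (by rcases hD with h | ⟨h, _⟩ <;> [left; right] <;> exact h)]
  decide
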